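-- pv_equiv track=rewrite | github.com/ayoubzulfiqar/Leetcode-Medium | NumberofSubstringsWithFixedRatio/number_of_substrings_with_fixed_ratio.py | numberOfSubstringsWithFixedRatio
-- ===== SOURCE A (Python) =====
-- def numberOfSubstringsWithFixedRatio(s: str, ratio_a: int, ratio_b: int) -> int:
--     count_a = 0
--     count_b = 0
--     total_subarrays = 0
--
--     freq = {0: 1}
--
--     for char in s:
--         if char == 'a':
--             count_a += 1
--         elif char == 'b':
--             count_b += 1
--
--         current_diff = count_a * ratio_b - count_b * ratio_a
--
--         if current_diff in freq:
--             total_subarrays += freq[current_diff]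
--             freq[current_diff] += 1
--         else:
--             freq[current_diff] = 1
--
--     return total_subarrays
-- ===== SOURCE B (Python) =====
-- def numberOfSubstringsWithFixedRatio(s: str, ratio_a: int, ratio_b: int) -> int:
--     # Build all prefix values of count_a*ratio_b - count_b*ratio_a (seed 0 included),
--     # then SORT them and count pairs of equal values with a run-length scan:
--     # no hash map at all; equal prefixes become adjacent after sorting.
--     count_a = 0
--     count_b = 0
--     prefixes = [0]
--     for char in s:
--         if char == 'a':
--             count_a += 1
--         elif char == 'b':
--             count_b += 1
--         prefixes.append(count_a * ratio_b - count_b * ratio_a)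
--     ordered = sorted(prefixes)
--     total = 0
--     prev = ordered[0]  # never empty: the seed 0 is always there
--     run = 1
--     for d in ordered[1:]:
--         if d == prev:
--             total += run
--             run += 1
--         else:
--             run = 1
--         prev = d
--     return total
-- ===== Notes on version B (the rewrite author's own statement) =====
-- stated objective: alternative
-- what changed: A counts equal prefix-difference pairs on the fly with a hash map; B tabulates all prefix differences (seed 0 included), sorts them, and counts pairs of equal values by a run-length scan over the sorted list, using no hash map.
import Mathlib
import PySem

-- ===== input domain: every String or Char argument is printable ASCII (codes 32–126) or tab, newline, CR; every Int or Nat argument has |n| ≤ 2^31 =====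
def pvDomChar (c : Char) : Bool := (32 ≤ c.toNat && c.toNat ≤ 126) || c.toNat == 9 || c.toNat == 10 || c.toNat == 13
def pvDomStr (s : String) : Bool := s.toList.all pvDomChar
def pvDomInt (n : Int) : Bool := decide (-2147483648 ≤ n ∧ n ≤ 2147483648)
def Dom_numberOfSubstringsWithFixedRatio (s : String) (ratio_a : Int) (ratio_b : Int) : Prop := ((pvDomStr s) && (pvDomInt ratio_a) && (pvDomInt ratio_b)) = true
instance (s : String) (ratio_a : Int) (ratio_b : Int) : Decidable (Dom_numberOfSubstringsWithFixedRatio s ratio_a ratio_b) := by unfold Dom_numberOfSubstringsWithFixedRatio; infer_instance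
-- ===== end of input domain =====

-- B replaces A's hash-map count-as-you-go scan by: tabulate all prefix-difference
-- values, SORT them, and count pairs of equal values by a run-length scan (alternative).

-- ===== PORT A =====
-- one loop iteration of A: update the a/b counts, then count earlier equal prefixes on the fly
def pvStepA (ratio_a ratio_b : Int) (st : Int × Int × Int × PySem.Dict Int Int) (c : Char) :
    Int × Int × Int × PySem.Dict Int Int :=
  let ca := if c = 'a' then st.1 + 1 else st.1
  let cb := if c = 'a' then st.2.1 else if c = 'b' then st.2.1 + 1 else st.2.1
  let d := ca * ratio_b - cb * ratio_a
  let total := st.2.2.1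
  let freq := st.2.2.2
  if freq.contains d then (ca, cb, total + freq.getD d 0, freq.insert d (freq.getD d 0 + 1))
  else (ca, cb, total, freq.insert d 1)

def numberOfSubstringsWithFixedRatio (s : String) (ratio_a : Int) (ratio_b : Int) : Int :=
  (s.toList.foldl (pvStepA ratio_a ratio_b) (0, 0, 0, PySem.Dict.ofList [((0 : Int), (1 : Int))])).2.2.1

-- ===== PORT B =====
-- phase-1 iteration of B: update the a/b counts and append the new prefix value
def pvStepB (ratio_a ratio_b : Int) (st : Int × Int × List Int) (c : Char) : Int × Int × List Int :=
  let ca := if c = 'a' then st.1 + 1 else st.1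
  let cb := if c = 'a' then st.2.1 else if c = 'b' then st.2.1 + 1 else st.2.1
  (ca, cb, st.2.2 ++ [ca * ratio_b - cb * ratio_a])

-- B's run-length scan over the tail of the sorted list: state (prev, run, total)
def pvRunScan : List Int → Int → Int → Int → Int
  | [], _, _, t => t
  | d :: ds, prev, r, t => if d = prev then pvRunScan ds d (r + 1) (t + r) else pvRunScan ds d 1 t

def numberOfSubstringsWithFixedRatio_alt (s : String) (ratio_a : Int) (ratio_b : Int) : Int :=
  let prefixes := (s.toList.foldl (pvStepB ratio_a ratio_b) (0, 0, [(0 : Int)])).2.2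
  match PySem.List.sorted prefixes (fun x => x) false with
  | [] => 0            -- unreachable: the seed 0 is always present
  | x :: xs => pvRunScan xs x 1 0

-- ===== PRECONDITION & SPEC =====
def Spec_numberOfSubstringsWithFixedRatio (s : String) (ratio_a : Int) (ratio_b : Int) (out : Int) : Prop := out = numberOfSubstringsWithFixedRatio_alt s ratio_a ratio_b
instance (s : String) (ratio_a : Int) (ratio_b : Int) (out : Int) : Decidable (Spec_numberOfSubstringsWithFixedRatio s ratio_a ratio_b out) := by unfold Spec_numberOfSubstringsWithFixedRatio; infer_instance

-- ===== CLAIM (what is proved, stated in full; the proofs are below) =====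
def Claim_equal_numberOfSubstringsWithFixedRatio : Prop := ∀ (s : String) (ratio_a : Int) (ratio_b : Int), Dom_numberOfSubstringsWithFixedRatio s ratio_a ratio_b → Spec_numberOfSubstringsWithFixedRatio s ratio_a ratio_b (numberOfSubstringsWithFixedRatio s ratio_a ratio_b)

-- ===== LEMMAS AND PROOFS =====

-- the sequence of prefix-difference values produced along cs from counts (ca, cb)
def pvDiffL (ratio_a ratio_b : Int) : List Char → Int → Int → List Int
  | [], _, _ => []
  | c :: cs, ca, cb =>
      let ca' := if c = 'a' then ca + 1 else ca
      let cb' := if c = 'a' then cb else if c = 'b' then cb + 1 else cb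
      (ca' * ratio_b - cb' * ratio_a) :: pvDiffL ratio_a ratio_b cs ca' cb'

-- the final (count_a, count_b) pair after cs
def pvCounts : List Char → Int → Int → Int × Int
  | [], ca, cb => (ca, cb)
  | c :: cs, ca, cb =>
      let ca' := if c = 'a' then ca + 1 else ca
      let cb' := if c = 'a' then cb else if c = 'b' then cb + 1 else cb
      pvCounts cs ca' cb'

-- A's running total: each new value d adds the number of earlier equal values (p = values so far)
def pvPairsAdd : List Int → List Int → Int
  | _, [] => 0
  | p, d :: ds => (p.count d : Int) + pvPairsAdd (p ++ [d]) ds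

-- A's dict update is exactly "counter extended by one more value"
theorem pvCounterIns (p : List Int) (d : Int) :
    (PySem.Dict.counter p).insert d ((p.count d : Int) + 1) = PySem.Dict.counter (p ++ [d]) := by
  rw [PySem.Dict.counter_append_singleton]
  simp [PySem.Dict.modify, PySem.Dict.getD_counter]

theorem pvStepA_core (p : List Int) (ca' cb' t dd : Int) :
    (if (PySem.Dict.counter p).contains dd
     then (ca', cb', t + (PySem.Dict.counter p).getD dd 0,
            (PySem.Dict.counter p).insert dd ((PySem.Dict.counter p).getD dd 0 + 1))
     else (ca', cb', t, (PySem.Dict.counter p).insert dd 1))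
    = (ca', cb', t + (p.count dd : Int), PySem.Dict.counter (p ++ [dd])) := by
  by_cases hm : dd ∈ p
  · have hc : (PySem.Dict.counter p).contains dd = true := by
      rw [PySem.Dict.contains_counter]; simpa using hm
    rw [if_pos hc, PySem.Dict.getD_counter, pvCounterIns]
  · have hc : (PySem.Dict.counter p).contains dd = false := by
      rw [PySem.Dict.contains_counter]; simpa using hm
    rw [if_neg (by simp [hc]), ← pvCounterIns]
    simp [List.count_eq_zero_of_not_mem hm]

theorem pvStepA_eq (ratio_a ratio_b : Int) (p : List Int) (ca cb t : Int) (c : Char) :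
    pvStepA ratio_a ratio_b (ca, cb, t, PySem.Dict.counter p) c
    = (let ca' := if c = 'a' then ca + 1 else ca
       let cb' := if c = 'a' then cb else if c = 'b' then cb + 1 else cb
       let dd := ca' * ratio_b - cb' * ratio_a
       (ca', cb', t + (p.count dd : Int), PySem.Dict.counter (p ++ [dd]))) := by
  exact pvStepA_core p _ _ t _

-- invariant of A's loop
theorem pvA_inv (ratio_a ratio_b : Int) (cs : List Char) : ∀ (ca cb t : Int) (p : List Int),
    cs.foldl (pvStepA ratio_a ratio_b) (ca, cb, t, PySem.Dict.counter p)
    = ((pvCounts cs ca cb).1, (pvCounts cs ca cb).2,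
        t + pvPairsAdd p (pvDiffL ratio_a ratio_b cs ca cb),
        PySem.Dict.counter (p ++ pvDiffL ratio_a ratio_b cs ca cb)) := by
  induction cs with
  | nil => intro ca cb t p; simp [pvCounts, pvDiffL, pvPairsAdd]
  | cons c cs ih =>
      intro ca cb t p
      rw [List.foldl_cons, pvStepA_eq, ih]
      simp only [pvCounts, pvDiffL, pvPairsAdd, List.append_assoc, List.singleton_append,
        Prod.mk.injEq]
      exact ⟨trivial, trivial, by ring, trivial⟩

-- B's phase-1 loop appends exactly the prefix-difference sequence
theorem pvB_prefixes (ratio_a ratio_b : Int) (cs : List Char) : ∀ (ca cb : Int) (ps : List Int),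
    (cs.foldl (pvStepB ratio_a ratio_b) (ca, cb, ps)).2.2 = ps ++ pvDiffL ratio_a ratio_b cs ca cb := by
  induction cs with
  | nil => intro ca cb ps; simp [pvDiffL]
  | cons c cs ih =>
      intro ca cb ps
      simp only [List.foldl_cons, pvStepB, pvDiffL, ih, List.append_assoc, List.singleton_append]

-- the number of equal pairs counted by pvPairsAdd depends only on the multiset of values
theorem pvPairsAdd_congr (l : List Int) : ∀ (p p' : List Int), p.Perm p' → pvPairsAdd p l = pvPairsAdd p' l := by
  induction l with
  | nil => intro p p' _; rfl
  | cons d ds ih =>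
      intro p p' h
      simp only [pvPairsAdd, h.count_eq, ih (p ++ [d]) (p' ++ [d]) (h.append_right _)]

theorem pvPairsAdd_perm (l l' : List Int) (h : l.Perm l') : ∀ (p : List Int), pvPairsAdd p l = pvPairsAdd p l' := by
  induction h with
  | nil => intro p; rfl
  | cons x h ih => intro p; simp only [pvPairsAdd, ih]
  | swap x y l =>
      intro p
      simp only [pvPairsAdd]
      rw [pvPairsAdd_congr l ((p ++ [y]) ++ [x]) ((p ++ [x]) ++ [y])
        (by simpa [List.append_assoc] using List.Perm.append_left p (List.Perm.swap x y []))]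
      have hc : (List.count x (p ++ [y]) : Int) + (List.count y p : Int)
          = (List.count y (p ++ [x]) : Int) + (List.count x p : Int) := by
        by_cases hxy : x = y
        · subst hxy; ring
        · simp [List.count_append, hxy, Ne.symm hxy]; ring
      linarith [hc]
  | trans h1 h2 ih1 ih2 => intro p; exact (ih1 p).trans (ih2 p)

-- run-length-scan invariant: q = already consumed values, prev its last/max, run = its multiplicity
theorem pvScan_inv (ds : List Int) : ∀ (q : List Int) (prev t : Int),
    ds.Pairwise (· ≤ ·) → prev ∈ q → (∀ x ∈ q, x ≤ prev) → (∀ x ∈ q, ∀ y ∈ ds, x ≤ y) →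
    pvRunScan ds prev (q.count prev : Int) t = t + pvPairsAdd q ds := by
  induction ds with
  | nil => intro q prev t _ _ _ _; simp [pvRunScan, pvPairsAdd]
  | cons d ds ih =>
      intro q prev t hp hmem hle hcross
      have hpd : prev ≤ d := hcross prev hmem d List.mem_cons_self
      obtain ⟨hdds, hp'⟩ := List.pairwise_cons.mp hp
      by_cases hdp : d = prev
      · subst hdp
        simp only [pvRunScan, pvPairsAdd]
        have hq' : ((q ++ [d]).count d : Int) = (q.count d : Int) + 1 := by
          simp [List.count_append]
        have := ih (q ++ [d]) d (t + (q.count d : Int)) hp'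
          (List.mem_append_right _ List.mem_cons_self)
          (by intro x hx
              rcases List.mem_append.mp hx with hx | hx
              · exact hle x hx
              · simp at hx; omega)
          (by intro x hx y hy
              rcases List.mem_append.mp hx with hx | hx
              · exact hcross x hx y (List.mem_cons_of_mem _ hy)
              · simp at hx; subst hx; exact hdds y hy)
        rw [hq'] at this
        rw [if_pos trivial, this]; ring
      · have hdq : d ∉ q := fun hdq => hdp (le_antisymm (hle d hdq) hpd)
        have hq' : ((q ++ [d]).count d : Int) = 1 := by
          simp [List.count_append, List.count_eq_zero_of_not_mem hdq]
        simp only [pvRunScan, if_neg hdp, pvPairsAdd,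
          List.count_eq_zero_of_not_mem hdq, Nat.cast_zero]
        have := ih (q ++ [d]) d t hp'
          (List.mem_append_right _ List.mem_cons_self)
          (by intro x hx
              rcases List.mem_append.mp hx with hx | hx
              · exact le_trans (hle x hx) hpd
              · simp at hx; omega)
          (by intro x hx y hy
              rcases List.mem_append.mp hx with hx | hx
              · exact hcross x hx y (List.mem_cons_of_mem _ hy)
              · simp at hx; subst hx; exact hdds y hy)
        rw [hq'] at this
        rw [this]; ring

-- on a nondecreasing list x :: xs, the run-length scan counts exactly the equal pairs
theorem pvScan_sorted' (x : Int) (xs : List Int) (hp : (x :: xs).Pairwise (· ≤ ·)) :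
    pvRunScan xs x 1 0 = pvPairsAdd [] (x :: xs) := by
  obtain ⟨hxs, hp'⟩ := List.pairwise_cons.mp hp
  have h1 : ((([x] : List Int).count x : Int)) = 1 := by simp
  have := pvScan_inv xs [x] x 0 hp' List.mem_cons_self
    (by intro y hy; simp at hy; omega)
    (by intro y hy z hz; simp at hy; subst hy; exact hxs z hz)
  rw [h1] at this
  simpa [pvPairsAdd] using this

-- ===== VERDICT (by name: the statement is the Claim_ definition above) =====
theorem numberOfSubstringsWithFixedRatio_spec : Claim_equal_numberOfSubstringsWithFixedRatio := by
  intro s ratio_a ratio_b _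
  unfold Spec_numberOfSubstringsWithFixedRatio
  have seed : PySem.Dict.ofList [((0 : Int), (1 : Int))] = PySem.Dict.counter [0] := by decide
  simp only [numberOfSubstringsWithFixedRatio, numberOfSubstringsWithFixedRatio_alt, seed,
    pvA_inv ratio_a ratio_b s.toList 0 0 0 [0],
    pvB_prefixes ratio_a ratio_b s.toList 0 0 [0], List.singleton_append]
  have hpw : (PySem.List.sorted ((0 : Int) :: pvDiffL ratio_a ratio_b s.toList 0 0) (fun x => x) false).Pairwise (· ≤ ·) := by
    simpa using PySem.List.sorted_pairwise ((0 : Int) :: pvDiffL ratio_a ratio_b s.toList 0 0) (fun x => x)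
  have h3 : pvPairsAdd [] (PySem.List.sorted ((0 : Int) :: pvDiffL ratio_a ratio_b s.toList 0 0) (fun x => x) false) = pvPairsAdd [] ((0 : Int) :: pvDiffL ratio_a ratio_b s.toList 0 0) :=
    pvPairsAdd_perm _ _ (PySem.List.sorted_perm ((0 : Int) :: pvDiffL ratio_a ratio_b s.toList 0 0) (fun x => x) false) []
  cases hsl : PySem.List.sorted ((0 : Int) :: pvDiffL ratio_a ratio_b s.toList 0 0) (fun x => x) false with
  | nil => exact absurd hsl (by simp [PySem.List.sorted_eq_nil_iff])
  | cons x xs =>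
      rw [hsl] at hpw h3
      show (0 : Int) + pvPairsAdd [0] (pvDiffL ratio_a ratio_b s.toList 0 0) = pvRunScan xs x 1 0
      rw [pvScan_sorted' x xs hpw, h3]
      simp [pvPairsAdd]
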